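-- pv_equiv track=rewrite | github.com/153079019shariq/ATPG_Sequential | Gates.py | AND_NAND_Obser
-- ===== SOURCE A (Python) =====
-- import copy
--
-- def AND_NAND_Obser(list_predecessorCC0,edgeCO):
-- 	Observability_list=[]
-- 	for i in list_predecessorCC0:
-- 		list_temp =copy.deepcopy(list_predecessorCC0)
-- 		list_temp.remove(i)
-- 		sum1=sum(list_temp) + edgeCO +1
-- 		Observability_list.append(sum1)
-- 	return Observability_list
-- ===== SOURCE B (Python) =====
-- def AND_NAND_Obser(list_predecessorCC0, edgeCO):
--     total = sum(list_predecessorCC0)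
--     return [total - i + edgeCO + 1 for i in list_predecessorCC0]
-- ===== Notes on version B (the rewrite author's own statement) =====
-- stated objective: faster
-- what changed: Replace per-element deepcopy+remove+sum (O(n^2)) by one precomputed total sum and the closed form total - element + edgeCO + 1 in a single pass.
import Mathlib
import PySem

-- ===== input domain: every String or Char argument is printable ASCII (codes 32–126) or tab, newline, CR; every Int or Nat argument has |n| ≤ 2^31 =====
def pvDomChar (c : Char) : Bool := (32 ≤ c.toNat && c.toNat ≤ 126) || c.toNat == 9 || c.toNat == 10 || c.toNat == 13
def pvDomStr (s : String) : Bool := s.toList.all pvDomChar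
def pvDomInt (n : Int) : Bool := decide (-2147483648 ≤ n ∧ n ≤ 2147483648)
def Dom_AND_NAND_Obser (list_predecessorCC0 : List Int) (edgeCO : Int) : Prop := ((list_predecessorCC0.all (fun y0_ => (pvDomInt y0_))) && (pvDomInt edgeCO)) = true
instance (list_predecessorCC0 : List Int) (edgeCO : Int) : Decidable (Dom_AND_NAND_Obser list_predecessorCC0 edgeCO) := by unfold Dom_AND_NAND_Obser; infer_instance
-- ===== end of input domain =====

-- ===== PORT A =====
-- For each element i: deepcopy list, remove first occurrence of i, sum + edgeCO + 1, append.
def AND_NAND_Obser (list_predecessorCC0 : List Int) (edgeCO : Int) : List Int :=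
  list_predecessorCC0.foldl
    (fun acc i =>
      -- list_temp = deepcopy(list); list_temp.remove(i): i ∈ list, so remove? is some
      let list_temp := (PySem.List.remove? list_predecessorCC0 i).getD []
      let sum1 := list_temp.sum + edgeCO + 1
      acc ++ [sum1]) []

-- ===== PORT B =====
-- B: precompute the total sum once; each result is total - element + edgeCO + 1.
def AND_NAND_Obser_alt (list_predecessorCC0 : List Int) (edgeCO : Int) : List Int :=
  let total := list_predecessorCC0.sum
  list_predecessorCC0.map (fun i => total - i + edgeCO + 1)

-- ===== PRECONDITION & SPEC =====
def Spec_AND_NAND_Obser (list_predecessorCC0 : List Int) (edgeCO : Int) (out : List Int) : Prop := out = AND_NAND_Obser_alt list_predecessorCC0 edgeCO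
instance (list_predecessorCC0 : List Int) (edgeCO : Int) (out : List Int) : Decidable (Spec_AND_NAND_Obser list_predecessorCC0 edgeCO out) := by unfold Spec_AND_NAND_Obser; infer_instance

-- ===== CLAIM (what is proved, stated in full; the proofs are below) =====
def Claim_equal_AND_NAND_Obser : Prop := ∀ (list_predecessorCC0 : List Int) (edgeCO : Int), Dom_AND_NAND_Obser list_predecessorCC0 edgeCO → Spec_AND_NAND_Obser list_predecessorCC0 edgeCO (AND_NAND_Obser list_predecessorCC0 edgeCO)

-- ===== LEMMAS AND PROOFS =====

-- ===== VERDICT (by name: the statement is the Claim_ definition above) =====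
lemma foldl_append_map (f : Int → Int) :
    ∀ (l acc : List Int), l.foldl (fun acc i => acc ++ [f i]) acc = acc ++ l.map f := by
  intro l
  induction l with
  | nil => intro acc; simp
  | cons x xs ih => intro acc; simp [List.foldl, ih]

lemma sum_remove (l : List Int) (i : Int) (h : i ∈ l) :
    ((PySem.List.remove? l i).getD []).sum = l.sum - i := by
  induction l with
  | nil => cases h
  | cons x xs ih =>
    by_cases hx : x = i
    · subst hx
      simp [PySem.List.remove?_cons_self]
    · have hmem : i ∈ xs := by
        cases List.mem_cons.mp h with
        | inl hh => exact absurd hh.symm hx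
        | inr hh => exact hh
      rw [PySem.List.remove?_cons_of_ne xs hx]
      cases hrem : PySem.List.remove? xs i with
      | none => exact absurd ((PySem.List.remove?_eq_none_iff xs i).mp hrem) (by simp [hmem])
      | some ys =>
        have := ih hmem
        rw [hrem] at this
        simp [Option.map, List.sum_cons] at this ⊢
        omega

theorem AND_NAND_Obser_spec : Claim_equal_AND_NAND_Obser := by
  intro l e _
  unfold Spec_AND_NAND_Obser AND_NAND_Obser AND_NAND_Obser_alt
  rw [foldl_append_map (fun i => ((PySem.List.remove? l i).getD []).sum + e + 1) l []]
  simp only [List.nil_append]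
  apply List.map_congr_left
  intro i hi
  rw [sum_remove l i hi]
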